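-- pv_equiv track=rewrite | github.com/nikolakulikova/pokus | DockerChecker.py | _check_tmpfs
-- ===== SOURCE A (Python) =====
-- def _check_tmpfs(val: list) -> bool:
--     was_required = False
--     for option in val:
--         if "=" not in option:
--             return False
--         option = option.split("=")
--         op = option[0].strip()
--         value = option[1].strip()
--         if op == "target":
--             was_required = True
--             if value == "":
--                 return False
--         elif op == "size":
--             if not value.isnumeric():
--                 return False
--     if not was_required:
--         return False
--     return True
-- ===== SOURCE B (Python) =====
-- def _check_tmpfs(val: list) -> bool:
--     # Pass 1: parse every element into (op, value); any element without '=' fails.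
--     pairs = []
--     for option in val:
--         if "=" not in option:
--             return False
--         parts = option.split("=")
--         pairs.append((parts[0].strip(), parts[1].strip()))
--     # Pass 2: declarative validation.
--     return (any(op == "target" for op, _ in pairs)
--             and all(v != "" for op, v in pairs if op == "target")
--             and all(v.isnumeric() for op, v in pairs if op == "size"))
-- ===== Notes on version B (the rewrite author's own statement) =====
-- stated objective: simpler
-- what changed: Separates parsing from validation: one pass builds (op,value) pairs (failing on missing '='), then the verdict is a declarative any/all over the parsed pairs, dropping the was_required flag and the in-loop early returns.
import Mathlib
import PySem

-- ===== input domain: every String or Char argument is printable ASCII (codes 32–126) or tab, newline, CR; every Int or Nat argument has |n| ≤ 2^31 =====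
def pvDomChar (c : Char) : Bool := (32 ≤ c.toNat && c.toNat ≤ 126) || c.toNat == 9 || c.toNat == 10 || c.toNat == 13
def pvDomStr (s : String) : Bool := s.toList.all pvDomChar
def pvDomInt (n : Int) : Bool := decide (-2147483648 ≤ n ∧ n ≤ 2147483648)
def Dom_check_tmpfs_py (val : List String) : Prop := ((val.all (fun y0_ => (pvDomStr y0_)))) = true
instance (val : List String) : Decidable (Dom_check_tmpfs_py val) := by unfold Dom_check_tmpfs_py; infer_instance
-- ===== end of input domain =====

-- B separates parsing (one pass building (op,value) pairs) from validation (any/all over the pairs): simpler, same cost.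


-- ===== PORT A =====
-- loop over val carrying the was_required flag; str.isnumeric = strIsdigit, exact on the ASCII domain
def checkA_go (was : Bool) : List String → Bool
  | [] => was            -- loop done: 'if not was_required: return False / return True'
  | o :: rest =>
    if !(PySem.Str.isIn "=" o) then false
    else
      let parts := (PySem.Str.split? o "=").getD []   -- sep ≠ "" so split? is some
      let op := PySem.Str.strip ((PySem.List.pyGet? parts 0).getD "")   -- index in range: split is nonempty
      let value := PySem.Str.strip ((PySem.List.pyGet? parts 1).getD "")  -- in range since '=' present
      if op == "target" then
        if value == "" then false else checkA_go true rest
      else if op == "size" then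
        if !(PySem.Str.strIsdigit value) then false else checkA_go was rest
      else checkA_go was rest

def check_tmpfs_py (val : List String) : Bool := checkA_go false val

-- ===== PORT B =====
-- pass 1 of Source B: parse every element to (op, value); none when some element lacks '='
def parsePairs : List String → Option (List (String × String))
  | [] => some []
  | o :: rest =>
    if PySem.Str.isIn "=" o then
      let parts := (PySem.Str.split? o "=").getD []
      let p := (PySem.Str.strip ((PySem.List.pyGet? parts 0).getD ""),
                PySem.Str.strip ((PySem.List.pyGet? parts 1).getD ""))
      (parsePairs rest).map (p :: ·)
    else none

-- pass 2 of Source B: declarative any/all verdict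
def check_tmpfs_py_alt (val : List String) : Bool :=
  match parsePairs val with
  | none => false
  | some pairs =>
      pairs.any (fun p => p.1 == "target") &&
      pairs.all (fun p => p.1 != "target" || p.2 != "") &&
      pairs.all (fun p => p.1 != "size" || PySem.Str.strIsdigit p.2)

-- ===== PRECONDITION & SPEC =====
def Spec_check_tmpfs_py (val : List String) (out : Bool) : Prop := out = check_tmpfs_py_alt val
instance (val : List String) (out : Bool) : Decidable (Spec_check_tmpfs_py val out) := by unfold Spec_check_tmpfs_py; infer_instance

-- ===== CLAIM (what is proved, stated in full; the proofs are below) =====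
def Claim_equal_check_tmpfs_py : Prop := ∀ (val : List String), Dom_check_tmpfs_py val → Spec_check_tmpfs_py val (check_tmpfs_py val)

-- ===== LEMMAS AND PROOFS =====
-- loop invariant: A's loop with flag 'was' equals B's verdict with 'was' or-ed into the any-target test
theorem checkA_go_eq_alt (val : List String) : ∀ was : Bool,
    checkA_go was val =
      match parsePairs val with
      | none => false
      | some pairs =>
          (was || pairs.any (fun p => p.1 == "target")) &&
          pairs.all (fun p => p.1 != "target" || p.2 != "") &&
          pairs.all (fun p => p.1 != "size" || PySem.Str.strIsdigit p.2) := by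
  induction val with
  | nil => intro was; simp [checkA_go, parsePairs]
  | cons o rest ih =>
    intro was
    simp only [checkA_go, parsePairs]
    by_cases h1 : PySem.Str.isIn "=" o = true
    · simp only [h1, Bool.not_true, if_true, if_false, Bool.false_eq_true]
      cases hp : parsePairs rest with
      | none =>
        simp only [Option.map_none]
        split_ifs <;> first | rfl | (rw [ih, hp])
      | some ps =>
        simp only [Option.map_some]
        set op := PySem.Str.strip ((PySem.List.pyGet? ((PySem.Str.split? o "=").getD []) 0).getD "") with hop
        set v := PySem.Str.strip ((PySem.List.pyGet? ((PySem.Str.split? o "=").getD []) 1).getD "") with hv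
        by_cases ht : op = "target"
        · by_cases he : v = ""
          · simp [ht, he, List.all_cons]
          · have hvne : (v != "") = true := by simpa using he
            rw [if_pos (by simp [ht]), if_neg (by simp [he]), ih true, hp]
            simp [List.any_cons, List.all_cons, beq_iff_eq, ht, hvne]
        · by_cases hs : op = "size"
          · by_cases hn : PySem.Chars.strIsdigit v.toList = true
            · rw [if_neg (by simp [ht]), if_pos (by simp [hs]), if_neg (by simpa using hn), ih was, hp]
              simp [List.any_cons, List.all_cons, bne_iff_ne, beq_iff_eq, ht, hs, hn]
            · have hn' : PySem.Chars.strIsdigit v.toList = false := by simpa using hn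
              rw [if_neg (by simp [ht]), if_pos (by simp [hs]), if_pos (by simp [hn'])]
              have hsz : (op != "size") = false := by simp [hs]
              simp [List.all_cons, hn', hsz]
          · have h2 : (op == "target") = false := by simpa using ht
            have h3 : (op != "target") = true := by simpa using ht
            have h4 : (op != "size") = true := by simpa using hs
            rw [if_neg (by simp [ht]), if_neg (by simp [hs]), ih was, hp]
            simp [List.any_cons, List.all_cons, h2, h3, h4]
    · have h1' : PySem.Chars.isIn ['='] o.toList = false := by simpa using h1
      simp [h1']

-- ===== VERDICT (by name: the statement is the Claim_ definition above) =====
theorem check_tmpfs_py_spec : Claim_equal_check_tmpfs_py := by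
  intro val _
  unfold Spec_check_tmpfs_py check_tmpfs_py check_tmpfs_py_alt
  rw [checkA_go_eq_alt val false]
  cases parsePairs val <;> simp
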